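-- pv_equiv track=rewrite | github.com/Lamine-MOH/Medical-Images-Watermarking | lsb.py | binary_to_gray_image_array
-- ===== SOURCE A (Python) =====
-- def binary_to_gray_image_array(binary_image, image_size=200):
--     image_array = []
--     row = []
--     col_index = 0
--     row_index = 0
--     for i in range(0, len(binary_image), 8):
--         row.append(int(binary_image[i:i+8], 2))
--
--         col_index += 1
--         if col_index >= image_size:
--             image_array.append(row)
--             row = []
--
--             col_index = 0
--             row_index += 1
--
--         if row_index >= image_size:
--             break
--
--     return image_array
-- ===== SOURCE B (Python) =====
-- def binary_to_gray_image_array(binary_image, image_size=200):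
--     pixels = [int(binary_image[i:i+8], 2) for i in range(0, len(binary_image), 8)]
--     if image_size <= 0:
--         return []
--     nrows = min(image_size, len(pixels) // image_size)
--     return [pixels[r*image_size:(r+1)*image_size] for r in range(nrows)]
-- ===== Notes on version B (the rewrite author's own statement) =====
-- stated objective: alternative
-- what changed: Replaces A's single fused loop (parse byte, grow current row, cap/break bookkeeping with col_index/row_index) by a two-pass parse-then-reshape: first a comprehension parsing all 8-bit chunks, then slicing that flat pixel list into complete rows of width image_size, capped at image_size rows.
-- intended difference: On image_size <= 0 with a nonempty binary string, A returns [[first byte]] (its break test runs only after a row was already flushed), while B returns the intended empty image for a nonpositive image size. — e.g. on binary_to_gray_image_array("1", 0): A returns [[1]], B returns []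
import Mathlib
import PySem

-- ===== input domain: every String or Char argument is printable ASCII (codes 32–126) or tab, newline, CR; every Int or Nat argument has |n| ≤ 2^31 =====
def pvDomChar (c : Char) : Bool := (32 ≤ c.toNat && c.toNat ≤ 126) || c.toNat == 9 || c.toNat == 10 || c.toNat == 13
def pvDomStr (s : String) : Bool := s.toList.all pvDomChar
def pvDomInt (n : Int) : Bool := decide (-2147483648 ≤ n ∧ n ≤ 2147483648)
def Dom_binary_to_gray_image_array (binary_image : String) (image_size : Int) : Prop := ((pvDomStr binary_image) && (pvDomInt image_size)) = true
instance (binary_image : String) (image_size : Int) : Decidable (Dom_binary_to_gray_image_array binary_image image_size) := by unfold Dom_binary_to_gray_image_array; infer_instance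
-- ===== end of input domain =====

-- B replaces A's fused parse/reshape loop (with early break) by a parse-then-chunk two-pass
-- structure (objective: alternative decomposition, same cost); on image_size ≤ 0 with a nonempty
-- string B returns the intended empty image where A leaks one partial row (see D_ below).

-- ===== PORT A =====
-- int(binary_image[i:i+8], 2): string slicing done on the char list; exact where the chunk is a
-- valid base-2 literal (guaranteed by Pre_); where Python raises ValueError, ofCharsBase? is none
-- and the port's `.getD 0` is unconstrained (outside Pre_).
def pvByte (cs : List Char) (i : Int) : Int :=
  (PySem.Int.ofCharsBase? (PySem.List.slice cs (some i) (some (i + 8))) 2).getD 0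

-- the for-loop with its two in-loop tests and the break, state (image_array, row, col_index, row_index)
def pvLoopA (cs : List Char) (sz : Int) :
    List Int → List (List Int) × List Int × Int × Int → List (List Int)
  | [], (arr, _, _, _) => arr
  | i :: rest, (arr, row, ci, ri) =>
      let row' := row ++ [pvByte cs i]
      let ci' := ci + 1
      let st' := if ci' ≥ sz then (arr ++ [row'], ([] : List Int), (0 : Int), ri + 1)
                 else (arr, row', ci', ri)
      if st'.2.2.2 ≥ sz then st'.1 else pvLoopA cs sz rest st'

def binary_to_gray_image_array (binary_image : String) (image_size : Int) : List (List Int) :=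
  pvLoopA binary_image.toList image_size
    (PySem.List.pyRange 0 (PySem.Str.len binary_image) 8) ([], [], 0, 0)

-- ===== PORT B =====
def binary_to_gray_image_array_alt (binary_image : String) (image_size : Int) : List (List Int) :=
  let pixels := (PySem.List.pyRange 0 (PySem.Str.len binary_image) 8).map
    (fun i => pvByte binary_image.toList i)
  if image_size ≤ 0 then []
  else
    let nrows := min image_size (PySem.Int.floordiv (pixels.length : Int) image_size)
    (PySem.List.pyRange 0 nrows 1).map
      (fun r => PySem.List.slice pixels (some (r * image_size)) (some ((r + 1) * image_size)))

-- ===== PRECONDITION & SPEC =====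
-- Pre_ excludes exactly the inputs where Python A raises ValueError: some 8-character chunk
-- binary_image[i:i+8] is not a valid base-2 integer literal (int(chunk, 2) fails).
def Pre_binary_to_gray_image_array (binary_image : String) (image_size : Int) : Prop :=
  ∀ i ∈ PySem.List.pyRange 0 (PySem.Str.len binary_image) 8,
    PySem.Int.ofCharsBase? (PySem.List.slice binary_image.toList (some i) (some (i + 8))) 2 ≠ none
instance (binary_image : String) (image_size : Int) : Decidable (Pre_binary_to_gray_image_array binary_image image_size) := by unfold Pre_binary_to_gray_image_array; infer_instance
def pvWitness_binary_to_gray_image_array : String × Int := ("0000000111111111", 2)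

-- On image_size ≤ 0 with a nonempty binary string, A returns [[first byte]] — leftover loop state
-- from its late break test — while B returns the intended empty image for a nonpositive size.
def D_binary_to_gray_image_array (binary_image : String) (image_size : Int) : Prop :=
  image_size ≤ 0 ∧ binary_image ≠ ""
instance (binary_image : String) (image_size : Int) : Decidable (D_binary_to_gray_image_array binary_image image_size) := by unfold D_binary_to_gray_image_array; infer_instance

def Spec_binary_to_gray_image_array (binary_image : String) (image_size : Int) (out : List (List Int)) : Prop := ¬ D_binary_to_gray_image_array binary_image image_size → out = binary_to_gray_image_array_alt binary_image image_size
instance (binary_image : String) (image_size : Int) (out : List (List Int)) : Decidable (Spec_binary_to_gray_image_array binary_image image_size out) := by unfold Spec_binary_to_gray_image_array; infer_instance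

def pvDiffWitness_binary_to_gray_image_array : String × Int := ("1", 0)
def pvDiffWitnessOut_binary_to_gray_image_array : (List (List Int)) × (List (List Int)) := ([[1]], [])

-- ===== CLAIM (what is proved, stated in full; the proofs are below) =====
def Claim_unchanged_binary_to_gray_image_array : Prop := ∀ (binary_image : String) (image_size : Int), Dom_binary_to_gray_image_array binary_image image_size → Pre_binary_to_gray_image_array binary_image image_size → Spec_binary_to_gray_image_array binary_image image_size (binary_to_gray_image_array binary_image image_size)
def Claim_changed_binary_to_gray_image_array : Prop := Dom_binary_to_gray_image_array (pvDiffWitness_binary_to_gray_image_array.1) (pvDiffWitness_binary_to_gray_image_array.2) ∧ Pre_binary_to_gray_image_array (pvDiffWitness_binary_to_gray_image_array.1) (pvDiffWitness_binary_to_gray_image_array.2) ∧ D_binary_to_gray_image_array (pvDiffWitness_binary_to_gray_image_array.1) (pvDiffWitness_binary_to_gray_image_array.2) ∧ binary_to_gray_image_array (pvDiffWitness_binary_to_gray_image_array.1) (pvDiffWitness_binary_to_gray_image_array.2) = pvDiffWitnessOut_binary_to_gray_image_array.1 ∧ binary_to_gray_image_array_alt (pvDiffWitness_binary_to_gray_image_array.1)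 (pvDiffWitness_binary_to_gray_image_array.2) = pvDiffWitnessOut_binary_to_gray_image_array.2 ∧ pvDiffWitnessOut_binary_to_gray_image_array.1 ≠ pvDiffWitnessOut_binary_to_gray_image_array.2
def Claim_exact_binary_to_gray_image_array : Prop := ∀ (binary_image : String) (image_size : Int), Dom_binary_to_gray_image_array binary_image image_size → Pre_binary_to_gray_image_array binary_image image_size → D_binary_to_gray_image_array binary_image image_size → binary_to_gray_image_array binary_image image_size ≠ binary_to_gray_image_array_alt binary_image image_size

-- ===== LEMMAS AND PROOFS =====

-- complete rows of width m, at most `cap` of them (fuel = cap)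
def pvRows (m : ℕ) : List Int → ℕ → List (List Int)
  | _, 0 => []
  | qs, cap + 1 => if qs.length < m then [] else qs.take m :: pvRows m (qs.drop m) cap

theorem pvRows_of_lt {m : ℕ} {qs : List Int} (h : qs.length < m) :
    ∀ cap, pvRows m qs cap = [] := by
  intro cap; cases cap <;> simp [pvRows, h]

theorem pvLoopA_eq (cs : List Char) (sz : Int) (hsz : 1 ≤ sz) :
    ∀ (idxs : List Int) (arr : List (List Int)) (row : List Int) (ri : Int),
      0 ≤ ri → ri < sz → (row.length : Int) < sz →
      pvLoopA cs sz idxs (arr, row, (row.length : Int), ri) =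
        arr ++ pvRows sz.toNat (row ++ idxs.map (pvByte cs)) (sz - ri).toNat := by
  intro idxs
  induction idxs with
  | nil =>
      intro arr row ri _ _ hrow
      simp [pvLoopA, pvRows_of_lt (show row.length < sz.toNat by omega)]
  | cons i rest ih =>
      intro arr row ri hri0 hri hrow
      rw [pvLoopA]
      by_cases hfull : (row.length : Int) + 1 ≥ sz
      · -- row becomes complete: (row ++ [byte]).length = sz.toNat
        have hlen : (row ++ [pvByte cs i]).length = sz.toNat := by
          simp only [List.length_append, List.length_cons, List.length_nil]; omega
        have hsplit : row ++ (i :: rest).map (pvByte cs)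
            = (row ++ [pvByte cs i]) ++ rest.map (pvByte cs) := by simp
        have htake : ((row ++ [pvByte cs i]) ++ rest.map (pvByte cs)).take sz.toNat
            = row ++ [pvByte cs i] := by rw [← hlen, List.take_left]
        have hdrop : ((row ++ [pvByte cs i]) ++ rest.map (pvByte cs)).drop sz.toNat
            = rest.map (pvByte cs) := by rw [← hlen, List.drop_left]
        have hge : ¬ ((row ++ [pvByte cs i]) ++ rest.map (pvByte cs)).length < sz.toNat := by
          simp only [List.length_append, List.length_cons, List.length_nil]; omega
        simp only [if_pos hfull]
        by_cases hbrk : ri + 1 ≥ sz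
        · -- break: this was the last allowed row
          have hcap : (sz - ri).toNat = 1 := by omega
          simp only [if_pos hbrk, hcap, hsplit]
          rw [pvRows, if_neg hge, htake]
          simp [pvRows]
        · -- row finished, keep going with an empty row
          simp only [if_neg hbrk]
          have h1 : (0 : ℤ) ≤ ri + 1 := by omega
          have h2 : ri + 1 < sz := by omega
          have h3 : ((([] : List Int)).length : ℤ) < sz := by simpa using hsz
          have hih := ih (arr ++ [row ++ [pvByte cs i]]) [] (ri + 1) h1 h2 h3
          simp only [List.length_nil, Nat.cast_zero, List.nil_append] at hih
          rw [hih]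
          have hcap : (sz - ri).toNat = (sz - (ri + 1)).toNat + 1 := by omega
          rw [hcap, hsplit, pvRows, if_neg hge, htake, hdrop]
          simp [List.append_assoc]
      · -- row still incomplete
        simp only [if_neg hfull]
        have hri' : ¬ ri ≥ sz := by omega
        simp only [if_neg hri']
        have hc : ((row.length : Int) + 1) = (((row ++ [pvByte cs i]).length : ℕ) : Int) := by
          simp
        rw [hc, ih arr (row ++ [pvByte cs i]) ri hri0 hri
          (by simp only [List.length_append, List.length_cons, List.length_nil]; push_cast; omega)]
        simp [List.append_assoc]

theorem pvRows_eq_ranges (m : ℕ) (hm : 1 ≤ m) :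
    ∀ (cap : ℕ) (qs : List Int),
      pvRows m qs cap =
        (List.range (min cap (qs.length / m))).map (fun r => (qs.drop (r * m)).take m) := by
  intro cap
  induction cap with
  | zero => intro qs; simp [pvRows]
  | succ cap ih =>
      intro qs
      rw [pvRows]
      by_cases h : qs.length < m
      · rw [if_pos h]
        have : qs.length / m = 0 := Nat.div_eq_of_lt h
        simp [this]
      · rw [if_neg h, ih]
        have hlen : (List.drop m qs).length = qs.length - m := by simp
        have hdiv : qs.length / m = (qs.length - m) / m + 1 :=
          Nat.div_eq_sub_div (by omega) (by omega)
        have hmin : min (cap + 1) (qs.length / m) = min cap ((qs.length - m) / m) + 1 := by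
          rw [hdiv]; omega
        rw [hlen, hmin, List.range_succ_eq_map, List.map_cons, List.map_map]
        congr 1
        · simp
        · apply List.map_congr_left
          intro r _
          simp only [Function.comp, List.drop_drop]
          rw [Nat.succ_mul, Nat.add_comm]

theorem alt_eq_rows (s : String) (sz : Int) (hsz : 1 ≤ sz) :
    binary_to_gray_image_array_alt s sz =
      pvRows sz.toNat ((PySem.List.pyRange 0 (PySem.Str.len s) 8).map (pvByte s.toList)) sz.toNat := by
  unfold binary_to_gray_image_array_alt
  rw [if_neg (by omega : ¬ sz ≤ 0)]
  dsimp only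
  set pixels := (PySem.List.pyRange 0 (PySem.Str.len s) 8).map (pvByte s.toList) with hpx
  rw [pvRows_eq_ranges sz.toNat (by omega)]
  have hm : ((sz.toNat : ℕ) : Int) = sz := by omega
  have hfd : PySem.Int.floordiv (pixels.length : Int) sz = ((pixels.length / sz.toNat : ℕ) : Int) := by
    rw [← hm]; exact_mod_cast PySem.Int.floordiv_natCast pixels.length sz.toNat
  have hmin : min sz (PySem.Int.floordiv (pixels.length : Int) sz)
      = ((min sz.toNat (pixels.length / sz.toNat) : ℕ) : Int) := by
    rw [hfd]; push_cast [hm]; rfl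
  rw [hmin, PySem.List.pyRange_zero_natCast, List.map_map]
  apply List.map_congr_left
  intro r _
  have h1 : (r : Int) * sz = ((r * sz.toNat : ℕ) : Int) := by push_cast [hm]; ring
  have h2 : ((r : Int) + 1) * sz = ((r * sz.toNat + sz.toNat : ℕ) : Int) := by push_cast [hm]; ring
  simp only [Function.comp]
  rw [h1, h2, PySem.List.slice_natCast]
  simp

-- ===== VERDICT (by name: the statement is the Claim_ definition above) =====
theorem binary_to_gray_image_array_spec : Claim_unchanged_binary_to_gray_image_array := by
  intro s sz _ _ hD
  by_cases hsz : 1 ≤ sz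
  · rw [alt_eq_rows s sz hsz]
    unfold binary_to_gray_image_array
    have := pvLoopA_eq s.toList sz hsz (PySem.List.pyRange 0 (PySem.Str.len s) 8) [] [] 0
      (le_refl 0) (by omega) (by simpa using hsz)
    simpa using this
  · -- sz ≤ 0, so (by ¬ D_) s = "" and both sides are []
    have hs : s = "" := by
      by_contra hne
      exact hD ⟨by omega, hne⟩
    subst hs
    simp [binary_to_gray_image_array, binary_to_gray_image_array_alt, pvLoopA,
      PySem.Str.len_eq, PySem.List.pyRange]
    intro h
    omega

set_option maxRecDepth 4000 in
theorem binary_to_gray_image_array_changed : Claim_changed_binary_to_gray_image_array := by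
  unfold Claim_changed_binary_to_gray_image_array
  decide

theorem binary_to_gray_image_array_tight : Claim_exact_binary_to_gray_image_array := by
  intro s sz _ _ hD
  obtain ⟨hsz, hne⟩ := hD
  have hlen : 1 ≤ PySem.Str.len s := by
    simp only [PySem.Str.len_eq]
    have : s.toList ≠ [] := fun h => hne (by rw [← String.ofList_toList (s := s), h])
    have : 0 < s.toList.length := List.length_pos_of_ne_nil this
    omega
  have hmem : (0 : ℤ) ∈ PySem.List.pyRange 0 (PySem.Str.len s) 8 := by
    rw [PySem.List.mem_pyRange_iff_of_pos (by omega)]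
    exact ⟨le_refl 0, by omega, by simp⟩
  obtain ⟨i, rest, hcons⟩ := List.exists_cons_of_ne_nil (List.ne_nil_of_mem hmem)
  unfold binary_to_gray_image_array binary_to_gray_image_array_alt
  rw [if_pos hsz, hcons, pvLoopA]
  have h1 : sz ≤ (1 : ℤ) := by omega
  simp [h1]
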